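-- pv_equiv track=rewrite | github.com/LoidPark/LLM_Agent | evaluation_test.py | mark_relevance_by_keywords
-- ===== SOURCE A (Python) =====
-- def mark_relevance_by_keywords(retrieved_contexts, needed_facts_keywords):
--     """
--     retrieved_contexts: 리스트[str]  (리트리버가 가져온 문서 조각들)
--     needed_facts_keywords: 리스트[세트[str]]
--         - 각 세트는 '한 팩트'를 대표하는 키워드 묶음 (AND로 모두 포함되면 맞았다고 보자)
--     반환:
--         retrieved_labels: 각 리트리브된 조각이 '어느 팩트라도' 만족하면 True
--         gold_count: 필요한 팩트 개수 (len(needed_facts_keywords))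
--         covered_facts: 발견된 팩트 인덱스 집합
--     """
--     retrieved_labels = []
--     covered_facts = set()
--
--     for ctx in retrieved_contexts:
--         tokens = set(ctx.lower().split())
--         is_rel = False
--         for i, fact_keys in enumerate(needed_facts_keywords):
--             # 매우 단순하게: 모든 키워드가 토큰에 존재하면 그 팩트 충족
--             if fact_keys.issubset(tokens):
--                 is_rel = True
--                 covered_facts.add(i)
--         retrieved_labels.append(is_rel)
--
--     gold_count = len(needed_facts_keywords)
--     return retrieved_labels, gold_count, covered_facts
-- ===== SOURCE B (Python) =====
-- def mark_relevance_by_keywords(retrieved_contexts, needed_facts_keywords):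
--     # Inverted index keyword -> fact indices; per context, count keyword hits
--     # per fact instead of testing every fact's keyword set for inclusion.
--     gold_count = len(needed_facts_keywords)
--     inverted = {}
--     for i, fact_keys in enumerate(needed_facts_keywords):
--         for kw in fact_keys:
--             inverted.setdefault(kw, []).append(i)
--     need = [len(fact_keys) for fact_keys in needed_facts_keywords]
--
--     retrieved_labels = []
--     covered_facts = set()
--     for ctx in retrieved_contexts:
--         hits = [0] * gold_count
--         for tok in set(ctx.lower().split()):
--             for i in inverted.get(tok, []):
--                 hits[i] += 1
--         is_rel = False
--         for i in range(gold_count):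
--             if hits[i] == need[i]:
--                 is_rel = True
--                 covered_facts.add(i)
--         retrieved_labels.append(is_rel)
--     return retrieved_labels, gold_count, covered_facts
-- ===== Notes on version B (the rewrite author's own statement) =====
-- stated objective: alternative
-- what changed: Replaces the per-context scan that subset-tests every fact's whole keyword set with an inverted index keyword->fact-indices built once; each context then counts keyword hits per fact by walking its tokens' posting lists, and a fact matches when its hit count equals its keyword count (trades repeated set-inclusion tests for one index build plus counting).
import Mathlib
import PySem

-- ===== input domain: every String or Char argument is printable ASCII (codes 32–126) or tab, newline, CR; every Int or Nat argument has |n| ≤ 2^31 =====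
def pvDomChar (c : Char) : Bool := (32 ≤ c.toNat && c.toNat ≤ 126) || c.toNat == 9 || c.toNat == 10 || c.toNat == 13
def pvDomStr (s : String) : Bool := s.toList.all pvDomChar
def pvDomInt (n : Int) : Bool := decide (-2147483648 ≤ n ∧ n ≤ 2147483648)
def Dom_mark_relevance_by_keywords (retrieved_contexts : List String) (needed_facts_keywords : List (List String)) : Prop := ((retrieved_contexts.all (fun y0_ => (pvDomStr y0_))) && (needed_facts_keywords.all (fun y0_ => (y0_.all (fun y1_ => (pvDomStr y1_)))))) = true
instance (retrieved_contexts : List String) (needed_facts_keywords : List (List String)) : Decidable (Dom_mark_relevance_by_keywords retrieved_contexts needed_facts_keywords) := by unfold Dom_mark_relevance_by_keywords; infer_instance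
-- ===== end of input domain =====

-- B replaces A's per-context subset test of every fact's keyword set with an inverted
-- index keyword -> fact indices built once, counting keyword hits per fact per context.

-- ===== PORT A =====
-- literal port of A: for each context, token set; for each (i, fact_keys) in enumerate,
-- if fact_keys.issubset(tokens): is_rel = True; covered_facts.add(i); labels.append(is_rel)
def mark_relevance_by_keywords (retrieved_contexts : List String) (needed_facts_keywords : List (List String)) : List Bool × Int × List Int :=
  let r := retrieved_contexts.foldl
    (fun (st : List Bool × PySem.Set Int) ctx =>
      let tokens : PySem.Set String := PySem.Set.ofList (PySem.Str.split₀ (PySem.Str.lower ctx))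
      let inner := (PySem.List.enumerate needed_facts_keywords 0).foldl
        (fun (p : Bool × PySem.Set Int) e =>
          if PySem.Set.issubset e.2 tokens then (true, PySem.Set.add p.2 e.1) else p)
        (false, st.2)
      (st.1 ++ [inner.1], inner.2))
    ([], PySem.Set.empty)
  (r.1, (needed_facts_keywords.length : Int), r.2)

-- ===== PORT B =====
-- literal port of Source B: inverted = {kw: [fact indices]} via setdefault/append
-- (= Dict.modify kw [] (· ++ [i])); per context hits = [0]*gold_count, incremented
-- from the posting lists of the context's distinct tokens; fact i matches iff
-- hits[i] == need[i].
def mark_relevance_by_keywords_alt (retrieved_contexts : List String) (needed_facts_keywords : List (List String)) : List Bool × Int × List Int :=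
  let gold_count : Int := (needed_facts_keywords.length : Int)
  let inverted : PySem.Dict String (List Int) :=
    (PySem.List.enumerate needed_facts_keywords 0).foldl
      (fun d e => e.2.foldl (fun d kw => d.modify kw [] (fun l => l ++ [e.1])) d)
      PySem.Dict.empty
  let need : List Int := needed_facts_keywords.map (fun fk => (fk.length : Int))
  let r := retrieved_contexts.foldl
    (fun (st : List Bool × PySem.Set Int) ctx =>
      let hits0 : List Int := List.replicate needed_facts_keywords.length 0
      let hits := (PySem.Set.ofList (PySem.Str.split₀ (PySem.Str.lower ctx))).foldl
        (fun h tok => (inverted.getD tok []).foldl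
            (fun h i => PySem.List.pySetD h i (PySem.List.pyGetD h i 0 + 1)) h)
        hits0
      let inner := (PySem.List.pyRange 0 gold_count).foldl
        (fun (p : Bool × PySem.Set Int) i =>
          if PySem.List.pyGetD hits i 0 == PySem.List.pyGetD need i 0 then (true, PySem.Set.add p.2 i) else p)
        (false, st.2)
      (st.1 ++ [inner.1], inner.2))
    ([], PySem.Set.empty)
  (r.1, gold_count, r.2)

-- ===== PRECONDITION & SPEC =====
def Spec_mark_relevance_by_keywords (retrieved_contexts : List String) (needed_facts_keywords : List (List String)) (out : List Bool × Int × List Int) : Prop := out = mark_relevance_by_keywords_alt retrieved_contexts needed_facts_keywords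
instance (retrieved_contexts : List String) (needed_facts_keywords : List (List String)) (out : List Bool × Int × List Int) : Decidable (Spec_mark_relevance_by_keywords retrieved_contexts needed_facts_keywords out) := by unfold Spec_mark_relevance_by_keywords; infer_instance

-- ===== CLAIM (what is proved, stated in full; the proofs are below) =====
def Claim_equal_mark_relevance_by_keywords : Prop := ∀ (retrieved_contexts : List String) (needed_facts_keywords : List (List String)), Dom_mark_relevance_by_keywords retrieved_contexts needed_facts_keywords → Spec_mark_relevance_by_keywords retrieved_contexts needed_facts_keywords (mark_relevance_by_keywords retrieved_contexts needed_facts_keywords)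

-- ===== LEMMAS AND PROOFS =====

-- the flattened (keyword, fact index) pairs, in B's insertion order
def pvPairsH (facts : List (List String)) : List (String × Int) :=
  (PySem.List.enumerate facts 0).flatMap (fun e => e.2.map (fun kw => (kw, e.1)))

theorem pv_enumerate_cons {α : Type} (x : α) (xs : List α) (s : Int) :
    PySem.List.enumerate (x :: xs) s = (s, x) :: PySem.List.enumerate xs (s + 1) := rfl

theorem pv_foldl_nested {α β γ δ : Type} (l : List α) (g : α → List β) (k : α → β → δ)
    (f : γ → δ → γ) (init : γ) :
    l.foldl (fun d e => (g e).foldl (fun d b => f d (k e b)) d) init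
      = (l.flatMap (fun e => (g e).map (k e))).foldl f init := by
  induction l generalizing init with
  | nil => rfl
  | cons x t ih =>
    simp only [List.foldl_cons, List.flatMap_cons, List.foldl_append, List.foldl_map]
    exact ih _

theorem pv_foldl_nested' {α β γ : Type} (l : List α) (g : α → List β)
    (f : γ → β → γ) (init : γ) :
    l.foldl (fun d e => (g e).foldl f d) init = (l.flatMap g).foldl f init := by
  have h := pv_foldl_nested l g (fun _ b => b) f init
  simpa using h

theorem pv_inv_spec (facts : List (List String)) (tok : String) :
    ((PySem.List.enumerate facts 0).foldl
      (fun d e => e.2.foldl (fun d kw => d.modify kw [] (fun l => l ++ [e.1])) d)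
      PySem.Dict.empty).getD tok []
    = ((pvPairsH facts).filter (fun p => p.1 == tok)).map (fun p => p.2) := by
  have h : (PySem.List.enumerate facts 0).foldl
      (fun d e => e.2.foldl (fun d kw => d.modify kw [] (fun l => l ++ [e.1])) d)
      PySem.Dict.empty
      = (pvPairsH facts).foldl
          (fun d (p : String × Int) => d.modify p.1 [] (fun l => l ++ [p.2]))
          PySem.Dict.empty :=
    pv_foldl_nested (PySem.List.enumerate facts 0) (fun e => e.2) (fun e kw => (kw, e.1))
      (fun d p => d.modify p.1 [] (fun l => l ++ [p.2])) PySem.Dict.empty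
  rw [h, PySem.Dict.getD_foldl_modify_append]
  simp [PySem.Dict.getD_empty]

theorem pv_pairs_snd_range (facts : List (List String)) :
    ∀ p ∈ pvPairsH facts, 0 ≤ p.2 ∧ p.2 < (facts.length : Int) := by
  intro p hp
  simp only [pvPairsH, List.mem_flatMap] at hp
  obtain ⟨e, he, hpe⟩ := hp
  rw [PySem.List.mem_enumerate_iff] at he
  obtain ⟨k, hk, rfl⟩ := he
  simp only [List.mem_map] at hpe
  obtain ⟨kw, hkw, rfl⟩ := hpe
  simp only
  omega

theorem pv_foldl_incr_count (L : List Int) (hits : List Int)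
    (hL : ∀ i ∈ L, 0 ≤ i ∧ i < (hits.length : Int)) (j : Nat) :
    PySem.List.pyGetD
      (L.foldl (fun h i => PySem.List.pySetD h i (PySem.List.pyGetD h i 0 + 1)) hits)
      (j : Int) 0
    = PySem.List.pyGetD hits (j : Int) 0 + (L.count (j : Int) : Int) := by
  induction L generalizing hits with
  | nil => simp
  | cons i t ih =>
    obtain ⟨h0, h1⟩ := hL i List.mem_cons_self
    have hi : ((i.toNat : Nat) : Int) = i := Int.toNat_of_nonneg h0
    have hlt : i.toNat < hits.length := by omega
    have hL' : ∀ x ∈ t, 0 ≤ x ∧ x < (((PySem.List.pySetD hits i (PySem.List.pyGetD hits i 0 + 1)).length : Nat) : Int) := by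
      intro x hx
      have := hL x (List.mem_cons_of_mem _ hx)
      simpa [PySem.List.length_pySetD] using this
    rw [List.foldl_cons, ih _ hL']
    rw [← hi, PySem.List.pyGetD_pySetD_natCast hits i.toNat j _ _ hlt]
    rw [List.count_cons]
    by_cases hji : j = i.toNat
    · subst hji
      rw [if_pos rfl]
      simp
      omega
    · rw [if_neg hji]
      have hb : ((((i.toNat : Nat) : Int)) == ((j : Nat) : Int)) = false := by
        rw [beq_eq_false_iff_ne]
        intro hc
        apply hji
        omega
      rw [hb]
      simp

theorem pv_countP_or_disjoint {α : Type} (l : List α) (A B : α → Bool)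
    (h : ∀ x ∈ l, ¬(A x = true ∧ B x = true)) :
    l.countP (fun x => A x || B x) = l.countP A + l.countP B := by
  induction l with
  | nil => simp
  | cons x t ih =>
    have hx := h x List.mem_cons_self
    have ht : ∀ y ∈ t, ¬(A y = true ∧ B y = true) := fun y hy => h y (List.mem_cons_of_mem _ hy)
    simp only [List.countP_cons, ih ht]
    cases hA : A x <;> cases hB : B x <;> simp_all <;> omega

theorem pv_sum_countP_nodup {α κ : Type} [BEq κ] [LawfulBEq κ]
    (T : List κ) (hT : T.Nodup) (l : List α) (q : α → Bool) (key : α → κ) :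
    (T.map (fun t => l.countP (fun x => q x && (key x == t)))).sum
      = l.countP (fun x => q x && T.contains (key x)) := by
  induction T with
  | nil => simp
  | cons t T' ih =>
    obtain ⟨htT, hT'⟩ := List.nodup_cons.mp hT
    simp only [List.map_cons, List.sum_cons, ih hT']
    have hdisj : ∀ x ∈ l, ¬((q x && (key x == t)) = true ∧ (q x && T'.contains (key x)) = true) := by
      intro x hx hc
      obtain ⟨ha, hb⟩ := hc
      simp only [Bool.and_eq_true, beq_iff_eq, List.contains_eq_mem, decide_eq_true_eq] at ha hb
      exact htT (ha.2 ▸ hb.2)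
    have hsplit := pv_countP_or_disjoint l _ _ hdisj
    rw [← hsplit]
    congr 1
    funext x
    cases hq : q x <;> simp [Bool.and_or_distrib_left]

theorem pv_pairs_countP (facts : List (List String)) (q : String → Bool) :
    ∀ (s : Int) (j : Nat) (hj : j < facts.length),
    ((PySem.List.enumerate facts s).flatMap (fun e => e.2.map (fun kw => (kw, e.1)))).countP
        (fun p => p.2 == s + (j : Int) && q p.1)
      = facts[j].countP q := by
  induction facts with
  | nil => intro s j hj; simp at hj
  | cons fk rest ih =>
    intro s j hj
    rw [pv_enumerate_cons, List.flatMap_cons, List.countP_append]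
    cases j with
    | zero =>
      have h1 : (List.map (fun kw => (kw, s)) fk).countP
          (fun p => p.2 == s + ((0 : Nat) : Int) && q p.1) = fk.countP q := by
        rw [List.countP_map]
        simp [Function.comp_def]
      have h2 : ((PySem.List.enumerate rest (s + 1)).flatMap
            (fun e => e.2.map (fun kw => (kw, e.1)))).countP
          (fun p => p.2 == s + ((0 : Nat) : Int) && q p.1) = 0 := by
        rw [List.countP_eq_zero]
        intro p hp
        simp only [List.mem_flatMap] at hp
        obtain ⟨e, he, hpe⟩ := hp
        rw [PySem.List.mem_enumerate_iff] at he
        obtain ⟨k, hk, rfl⟩ := he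
        simp only [List.mem_map] at hpe
        obtain ⟨kw, hkw, rfl⟩ := hpe
        simp only [Bool.and_eq_true, beq_iff_eq, not_and]
        intro hc
        omega
      rw [h1, h2]
      simp
    | succ j' =>
      have hj' : j' < rest.length := by simpa using hj
      have h1 : (List.map (fun kw => (kw, s)) fk).countP
          (fun p => p.2 == s + (((j' + 1) : Nat) : Int) && q p.1) = 0 := by
        rw [List.countP_eq_zero]
        intro p hp
        simp only [List.mem_map] at hp
        obtain ⟨kw, hkw, rfl⟩ := hp
        simp only [Bool.and_eq_true, beq_iff_eq, not_and]
        intro hc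
        omega
      have hpred : (fun p : String × Int => p.2 == s + (((j' + 1) : Nat) : Int) && q p.1)
          = (fun p : String × Int => p.2 == (s + 1) + ((j' : Nat) : Int) && q p.1) := by
        funext p
        have hc : s + (((j' + 1) : Nat) : Int) = (s + 1) + ((j' : Nat) : Int) := by
          push_cast
          ring
        rw [hc]
      rw [h1, hpred, ih (s + 1) j' hj']
      simp

theorem pv_hits_getD (facts : List (List String)) (T : List String) (hT : T.Nodup)
    (j : Nat) (hj : j < facts.length) :
    PySem.List.pyGetD
      (T.foldl
        (fun h tok =>
          (((PySem.List.enumerate facts 0).foldl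
              (fun d e => e.2.foldl (fun d kw => d.modify kw [] (fun l => l ++ [e.1])) d)
              PySem.Dict.empty).getD tok []).foldl
            (fun h i => PySem.List.pySetD h i (PySem.List.pyGetD h i 0 + 1)) h)
        (List.replicate facts.length 0))
      (j : Int) 0
    = (facts[j].countP (fun kw => T.contains kw) : Int) := by
  have hfold : T.foldl
      (fun h tok =>
        (((PySem.List.enumerate facts 0).foldl
            (fun d e => e.2.foldl (fun d kw => d.modify kw [] (fun l => l ++ [e.1])) d)
            PySem.Dict.empty).getD tok []).foldl
          (fun h i => PySem.List.pySetD h i (PySem.List.pyGetD h i 0 + 1)) h)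
      (List.replicate facts.length (0 : Int))
      = (T.flatMap (fun tok =>
          ((PySem.List.enumerate facts 0).foldl
            (fun d e => e.2.foldl (fun d kw => d.modify kw [] (fun l => l ++ [e.1])) d)
            PySem.Dict.empty).getD tok [])).foldl
          (fun h i => PySem.List.pySetD h i (PySem.List.pyGetD h i 0 + 1))
          (List.replicate facts.length (0 : Int)) :=
    pv_foldl_nested' T _ _ _
  have hrange : ∀ i ∈ (T.flatMap (fun tok =>
        ((PySem.List.enumerate facts 0).foldl
          (fun d e => e.2.foldl (fun d kw => d.modify kw [] (fun l => l ++ [e.1])) d)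
          PySem.Dict.empty).getD tok [])),
      0 ≤ i ∧ i < (((List.replicate facts.length (0 : Int)).length : Nat) : Int) := by
    intro i hi
    simp only [List.mem_flatMap] at hi
    obtain ⟨tok, htok, hi⟩ := hi
    rw [pv_inv_spec] at hi
    simp only [List.mem_map] at hi
    obtain ⟨p, hp, rfl⟩ := hi
    have := pv_pairs_snd_range facts p (List.mem_of_mem_filter hp)
    simpa using this
  refine (congrArg (fun l => PySem.List.pyGetD l ((j : Nat) : Int) 0) hfold).trans ?_
  refine (pv_foldl_incr_count _ _ hrange j).trans ?_
  have hgetr : PySem.List.pyGetD (List.replicate facts.length (0 : Int)) (j : Int) 0 = 0 := by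
    rw [PySem.List.pyGetD_natCast]
    exact List.getD_replicate 0 hj
  rw [hgetr, List.count_flatMap]
  have hmap : ∀ tok ∈ T, (List.count ((j : Nat) : Int) ∘ fun tok =>
        ((PySem.List.enumerate facts 0).foldl
          (fun d e => e.2.foldl (fun d kw => d.modify kw [] (fun l => l ++ [e.1])) d)
          PySem.Dict.empty).getD tok []) tok
      = (pvPairsH facts).countP (fun p => (p.2 == ((j : Nat) : Int)) && (p.1 == tok)) := by
    intro tok _
    simp only [Function.comp]
    rw [pv_inv_spec]
    rw [List.count, List.countP_map, List.countP_filter]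
    rfl
  rw [List.map_congr_left hmap]
  rw [pv_sum_countP_nodup T hT (pvPairsH facts) (fun p => p.2 == ((j : Nat) : Int)) Prod.fst]
  have h0j : ((j : Nat) : Int) = (0 : Int) + ((j : Nat) : Int) := by omega
  have := pv_pairs_countP facts (fun kw => T.contains kw) 0 j hj
  simp only [pvPairsH]
  rw [show (fun p : String × Int => (p.2 == ((j : Nat) : Int)) && T.contains p.1)
      = (fun p : String × Int => (p.2 == (0 : Int) + ((j : Nat) : Int)) && T.contains p.1) by
    funext p
    rw [← h0j]]
  rw [this]
  simp


theorem pv_cond_eq (fk T : List String) :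
    PySem.Set.issubset fk T
      = (((fk.countP (fun kw => T.contains kw) : Nat) : Int) == ((fk.length : Nat) : Int)) := by
  by_cases h : ∀ kw ∈ fk, T.contains kw = true
  · have h1 : PySem.Set.issubset fk T = true := by
      simp only [PySem.Set.issubset, List.all_eq_true]
      exact h
    have h2 : fk.countP (fun kw => T.contains kw) = fk.length := List.countP_eq_length.mpr h
    rw [h1, h2]
    simp
  · have h1 : PySem.Set.issubset fk T = false := by
      simp only [PySem.Set.issubset]
      rw [List.all_eq_false]
      push Not at h
      obtain ⟨kw, hkw, hc⟩ := h
      refine ⟨kw, hkw, ?_⟩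
      simpa using hc
    rw [h1]
    symm
    rw [beq_eq_false_iff_ne]
    intro heq
    exact h (List.countP_eq_length.mp (by exact_mod_cast heq))

theorem pv_need_getD (facts : List (List String)) (j : Nat) (hj : j < facts.length) :
    PySem.List.pyGetD (facts.map (fun fk => ((fk.length : Nat) : Int))) ((j : Nat) : Int) 0
      = ((facts[j].length : Nat) : Int) := by
  rw [PySem.List.pyGetD_natCast, List.getD_eq_getElem?_getD]
  simp [List.getElem?_map, List.getElem?_eq_getElem hj]

-- the per-context step of port A, named for the proofs
def pvStepA (facts : List (List String)) :
    (List Bool × PySem.Set Int) → String → (List Bool × PySem.Set Int) :=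
  fun st ctx =>
    let tokens : PySem.Set String := PySem.Set.ofList (PySem.Str.split₀ (PySem.Str.lower ctx))
    let inner := (PySem.List.enumerate facts 0).foldl
      (fun (p : Bool × PySem.Set Int) e =>
        if PySem.Set.issubset e.2 tokens then (true, PySem.Set.add p.2 e.1) else p)
      (false, st.2)
    (st.1 ++ [inner.1], inner.2)

-- the per-context step of port B, named for the proofs
def pvStepB (facts : List (List String)) :
    (List Bool × PySem.Set Int) → String → (List Bool × PySem.Set Int) :=
  fun st ctx =>
    let hits0 : List Int := List.replicate facts.length 0
    let hits := (PySem.Set.ofList (PySem.Str.split₀ (PySem.Str.lower ctx))).foldl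
      (fun h tok =>
        (((PySem.List.enumerate facts 0).foldl
            (fun d e => e.2.foldl (fun d kw => d.modify kw [] (fun l => l ++ [e.1])) d)
            PySem.Dict.empty).getD tok []).foldl
          (fun h i => PySem.List.pySetD h i (PySem.List.pyGetD h i 0 + 1)) h)
      hits0
    let inner := (PySem.List.pyRange 0 ((facts.length : Nat) : Int)).foldl
      (fun (p : Bool × PySem.Set Int) i =>
        if PySem.List.pyGetD hits i 0 == PySem.List.pyGetD (facts.map (fun fk => ((fk.length : Nat) : Int))) i 0
        then (true, PySem.Set.add p.2 i) else p)
      (false, st.2)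
    (st.1 ++ [inner.1], inner.2)

theorem pv_step_eq (facts : List (List String)) (st : List Bool × PySem.Set Int) (ctx : String) :
    pvStepA facts st ctx = pvStepB facts st ctx := by
  unfold pvStepA pvStepB
  dsimp only
  have hinner :
      (PySem.List.enumerate facts 0).foldl
        (fun (p : Bool × PySem.Set Int) e =>
          if PySem.Set.issubset e.2 (PySem.Set.ofList (PySem.Str.split₀ (PySem.Str.lower ctx)))
          then (true, PySem.Set.add p.2 e.1) else p)
        (false, st.2)
      = (PySem.List.pyRange 0 ((facts.length : Nat) : Int)).foldl
        (fun (p : Bool × PySem.Set Int) i =>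
          if PySem.List.pyGetD
              ((PySem.Set.ofList (PySem.Str.split₀ (PySem.Str.lower ctx))).foldl
                (fun h tok =>
                  (((PySem.List.enumerate facts 0).foldl
                      (fun d e => e.2.foldl (fun d kw => d.modify kw [] (fun l => l ++ [e.1])) d)
                      PySem.Dict.empty).getD tok []).foldl
                    (fun h i => PySem.List.pySetD h i (PySem.List.pyGetD h i 0 + 1)) h)
                (List.replicate facts.length 0)) i 0
            == PySem.List.pyGetD (facts.map (fun fk => ((fk.length : Nat) : Int))) i 0
          then (true, PySem.Set.add p.2 i) else p)
        (false, st.2) := by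
    have he : PySem.List.enumerate facts 0
        = (PySem.List.pyRange 0 ((facts.length : Nat) : Int)).map
            (fun j => (j, PySem.List.pyGetD facts j ([] : List String))) := by
      have h := PySem.List.enumerate_eq_map_pyRange facts ([] : List String)
      simpa using h
    conv_lhs => rw [he]
    rw [List.foldl_map]
    apply PySem.List.foldl_congr_mem'
    intro i hi acc
    rw [PySem.List.mem_pyRange_one] at hi
    obtain ⟨h0, h1⟩ := hi
    have hj : i.toNat < facts.length := by omega
    have hi' : ((i.toNat : Nat) : Int) = i := Int.toNat_of_nonneg h0
    rw [← hi']
    have hfacts : PySem.List.pyGetD facts ((i.toNat : Nat) : Int) ([] : List String) = facts[i.toNat] := by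
      rw [PySem.List.pyGetD_natCast, List.getD_eq_getElem?_getD]
      simp [List.getElem?_eq_getElem hj]
    have hhits := pv_hits_getD facts (PySem.Set.ofList (PySem.Str.split₀ (PySem.Str.lower ctx)))
      (PySem.Set.nodup_ofList _) i.toNat hj
    have hneed := pv_need_getD facts i.toNat hj
    simp only []
    rw [hfacts, hhits, hneed, ← pv_cond_eq]
  rw [hinner]

theorem pv_ports_eq (ctxs : List String) (facts : List (List String)) :
    mark_relevance_by_keywords ctxs facts = mark_relevance_by_keywords_alt ctxs facts := by
  have hA : mark_relevance_by_keywords ctxs facts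
      = ((ctxs.foldl (pvStepA facts) ([], PySem.Set.empty)).1, ((facts.length : Nat) : Int),
         (ctxs.foldl (pvStepA facts) ([], PySem.Set.empty)).2) := rfl
  have hB : mark_relevance_by_keywords_alt ctxs facts
      = ((ctxs.foldl (pvStepB facts) ([], PySem.Set.empty)).1, ((facts.length : Nat) : Int),
         (ctxs.foldl (pvStepB facts) ([], PySem.Set.empty)).2) := rfl
  rw [hA, hB,
    PySem.List.foldl_congr_mem' ctxs (pvStepA facts) (pvStepB facts) ([], PySem.Set.empty)
      (fun ctx _ acc => pv_step_eq facts acc ctx)]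

-- ===== VERDICT (by name: the statement is the Claim_ definition above) =====
theorem mark_relevance_by_keywords_spec : Claim_equal_mark_relevance_by_keywords := by
  intro ctxs facts _
  unfold Spec_mark_relevance_by_keywords
  exact pv_ports_eq ctxs facts
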